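-- pv_equiv track=rewrite | github.com/zhi-nguyen/HIS-AIO | backend/apps/core_services/reception/views.py | _extract_triage_code
-- ===== SOURCE A (Python) =====
-- def _extract_triage_code(ai_response: str) -> str:
--     """
--     Extract CODE_RED/CODE_YELLOW/CODE_GREEN from AI response.
--
--     Lấy code CUỐI CÙNG trong text (= kết luận), không phải đầu tiên
--     (tránh false positive từ thinking steps nhắc đến CODE_RED).
--     """
--     text = ai_response.upper()
--     codes = ['CODE_BLUE', 'CODE_RED', 'CODE_YELLOW', 'CODE_GREEN']
--
--     last_pos = -1
--     last_code = 'CODE_GREEN'  # Default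
--
--     for code in codes:
--         pos = text.rfind(code)
--         if pos > last_pos:
--             last_pos = pos
--             last_code = code
--
--     return last_code
-- ===== SOURCE B (Python) =====
-- def _extract_triage_code(ai_response: str) -> str:
--     # Single reverse scan: return the code at the rightmost position where any
--     # code occurs, instead of four full rfind passes.
--     text = ai_response.upper()
--     codes = ('CODE_BLUE', 'CODE_RED', 'CODE_YELLOW', 'CODE_GREEN')
--     for i in range(len(text) - 1, -1, -1):
--         for code in codes:
--             if text.startswith(code, i):
--                 return code
--     return 'CODE_GREEN'
-- ===== Notes on version B (the rewrite author's own statement) =====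
-- stated objective: alternative
-- what changed: Replaces four full rfind scans plus a running max over codes by a single reverse scan from the end of the text that returns the first (hence rightmost) position where any code starts, defaulting to CODE_GREEN.
import Mathlib
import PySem

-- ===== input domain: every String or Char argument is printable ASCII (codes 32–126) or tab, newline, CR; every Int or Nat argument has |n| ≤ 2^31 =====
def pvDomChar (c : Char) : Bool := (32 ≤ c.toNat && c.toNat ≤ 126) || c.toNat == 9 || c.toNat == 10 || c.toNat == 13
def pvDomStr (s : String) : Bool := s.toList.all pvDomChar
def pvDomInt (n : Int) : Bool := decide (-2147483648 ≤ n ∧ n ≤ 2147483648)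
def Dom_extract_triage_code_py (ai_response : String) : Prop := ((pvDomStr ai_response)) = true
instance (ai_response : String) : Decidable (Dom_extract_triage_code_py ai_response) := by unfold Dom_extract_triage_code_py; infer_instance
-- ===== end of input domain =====

-- B replaces A's four rfind scans + running max by one reverse scan returning the first
-- (rightmost) match; objective: alternative (single pass instead of four).

-- ===== PORT A =====
def extract_triage_code_py (ai_response : String) : String :=
  let text := PySem.Str.upper ai_response
  let codes : List String := ["CODE_BLUE", "CODE_RED", "CODE_YELLOW", "CODE_GREEN"]
  let st := codes.foldl (fun (st : Int × String) code =>
      let pos := PySem.Str.rfind text code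
      if pos > st.1 then (pos, code) else st) ((-1 : Int), "CODE_GREEN")
  st.2

-- ===== PORT B =====
-- loop 'for i in range(len(text)-1, -1, -1)' with early return, as structural
-- recursion on the counter k = i + 1; text.startswith(code, i) (0 ≤ i) is exact as
-- PySem.Chars.startswith on (text.toList.drop i).
def extract_triage_code_alt_go (t : List Char) : Nat → String
  | 0 => "CODE_GREEN"
  | k + 1 =>
    match (["CODE_BLUE", "CODE_RED", "CODE_YELLOW", "CODE_GREEN"] : List String).find?
        (fun code => PySem.Chars.startswith (t.drop k) code.toList) with
    | some code => code
    | none => extract_triage_code_alt_go t k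

def extract_triage_code_py_alt (ai_response : String) : String :=
  let t := (PySem.Str.upper ai_response).toList
  extract_triage_code_alt_go t t.length

-- ===== PRECONDITION & SPEC =====
def Spec_extract_triage_code_py (ai_response : String) (out : String) : Prop := out = extract_triage_code_py_alt ai_response
instance (ai_response : String) (out : String) : Decidable (Spec_extract_triage_code_py ai_response out) := by unfold Spec_extract_triage_code_py; infer_instance

-- ===== CLAIM (what is proved, stated in full; the proofs are below) =====
def Claim_equal_extract_triage_code_py : Prop := ∀ (ai_response : String), Dom_extract_triage_code_py ai_response → Spec_extract_triage_code_py ai_response (extract_triage_code_py ai_response)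

-- ===== LEMMAS AND PROOFS =====

-- A's fold over the four codes, as a function of the four rfind values.
def pvCombine (b r y g : Int) : String :=
  let s1 : Int × String := if b > -1 then (b, "CODE_BLUE") else (-1, "CODE_GREEN")
  let s2 : Int × String := if r > s1.1 then (r, "CODE_RED") else s1
  let s3 : Int × String := if y > s2.1 then (y, "CODE_YELLOW") else s2
  let s4 : Int × String := if g > s3.1 then (g, "CODE_GREEN") else s3
  s4.2

theorem pv_go_le (t c : List Char) (k : Nat) : PySem.Chars.rfind.go t c k ≤ (k : Int) := by
  induction k with
  | zero => simp only [PySem.Chars.rfind.go]; split <;> simp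
  | succ j ih =>
    simp only [PySem.Chars.rfind.go]
    split
    · simp
    · exact le_trans ih (by push_cast; omega)

theorem pv_neg_one_le_go (t c : List Char) (k : Nat) : (-1 : Int) ≤ PySem.Chars.rfind.go t c k := by
  induction k with
  | zero => simp only [PySem.Chars.rfind.go]; split <;> simp
  | succ j ih =>
    simp only [PySem.Chars.rfind.go]
    split
    · push_cast; omega
    · exact ih

-- Main invariant: B's reverse scan down from position k equals A's combination of
-- the four per-code "greatest occurrence ≤ k" values.
theorem pv_main (t : List Char) (k : Nat) :
    extract_triage_code_alt_go t (k + 1) =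
      pvCombine (PySem.Chars.rfind.go t "CODE_BLUE".toList k)
        (PySem.Chars.rfind.go t "CODE_RED".toList k)
        (PySem.Chars.rfind.go t "CODE_YELLOW".toList k)
        (PySem.Chars.rfind.go t "CODE_GREEN".toList k) := by
  induction k with
  | zero =>
    simp only [extract_triage_code_alt_go, PySem.Chars.rfind.go, List.find?,
      PySem.Chars.startswith, List.drop_zero]
    by_cases hB : ("CODE_BLUE".toList).isPrefixOf t = true <;>
      by_cases hR : ("CODE_RED".toList).isPrefixOf t = true <;>
        by_cases hY : ("CODE_YELLOW".toList).isPrefixOf t = true <;>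
          by_cases hG : ("CODE_GREEN".toList).isPrefixOf t = true <;>
            · simp only [hB, hR, hY, hG, if_true, if_false,
                Bool.false_eq_true, pvCombine]
              rfl
  | succ j ih =>
    have leB := pv_go_le t "CODE_BLUE".toList j
    have leR := pv_go_le t "CODE_RED".toList j
    have leY := pv_go_le t "CODE_YELLOW".toList j
    have leG := pv_go_le t "CODE_GREEN".toList j
    have geB := pv_neg_one_le_go t "CODE_BLUE".toList j
    have geR := pv_neg_one_le_go t "CODE_RED".toList j
    have geY := pv_neg_one_le_go t "CODE_YELLOW".toList j
    have geG := pv_neg_one_le_go t "CODE_GREEN".toList j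
    simp only [extract_triage_code_alt_go, PySem.Chars.rfind.go, List.find?,
      PySem.Chars.startswith]
    by_cases hB : ("CODE_BLUE".toList).isPrefixOf (t.drop (j + 1)) = true <;>
      by_cases hR : ("CODE_RED".toList).isPrefixOf (t.drop (j + 1)) = true <;>
        by_cases hY : ("CODE_YELLOW".toList).isPrefixOf (t.drop (j + 1)) = true <;>
          by_cases hG : ("CODE_GREEN".toList).isPrefixOf (t.drop (j + 1)) = true <;>
            · simp only [hB, hR, hY, hG, if_true, if_false,
                Bool.false_eq_true, pvCombine]
              first
              | (exact ih)
              | (split_ifs <;> (try rfl) <;> omega)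

-- A code (length ≥ 9) is never a prefix of the empty tail at position t.length.
theorem pv_no_match_at_len (t c : List Char) (hc : c ≠ []) :
    c.isPrefixOf (t.drop t.length) = false := by
  rw [List.drop_length]
  cases c with
  | nil => exact absurd rfl hc
  | cons a l => rfl

theorem pv_go_len (t : List Char) (c : List Char) (hc : c ≠ []) (m : Nat)
    (hm : t.length = m + 1) :
    PySem.Chars.rfind.go t c t.length = PySem.Chars.rfind.go t c m := by
  have h := pv_no_match_at_len t c hc
  rw [hm] at h ⊢
  simp only [PySem.Chars.rfind.go, h]
  simp

-- ===== VERDICT (by name: the statement is the Claim_ definition above) =====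
theorem extract_triage_code_py_spec : Claim_equal_extract_triage_code_py := by
  intro ai_response _
  unfold Spec_extract_triage_code_py extract_triage_code_py extract_triage_code_py_alt
  simp only [List.foldl, PySem.Str.rfind, PySem.Chars.rfind]
  set t := (PySem.Str.upper ai_response).toList with ht
  cases hn : t.length with
  | zero =>
    have ht0 : t = [] := List.eq_nil_of_length_eq_zero hn
    rw [ht0]
    simp [extract_triage_code_alt_go, PySem.Chars.rfind.go]
  | succ m =>
    have hB := pv_go_len t "CODE_BLUE".toList (by decide) m hn
    have hR := pv_go_len t "CODE_RED".toList (by decide) m hn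
    have hY := pv_go_len t "CODE_YELLOW".toList (by decide) m hn
    have hG := pv_go_len t "CODE_GREEN".toList (by decide) m hn
    rw [hn] at hB hR hY hG
    rw [hB, hR, hY, hG, pv_main t m]
    simp [pvCombine]
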